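-- pv_equiv track=rewrite | github.com/xorbitsai/inference | xinference/thirdparty/melo/text/fr_phonemizer/fr_to_ipa.py | remove_consecutive_t
-- ===== SOURCE A (Python) =====
-- def remove_consecutive_t(input_str):
--     result = []
--     count = 0
--
--     for char in input_str:
--         if char == 't':
--             count += 1
--         else:
--             if count < 3:
--                 result.extend(['t'] * count)
--             count = 0
--             result.append(char)
--
--     if count < 3:
--         result.extend(['t'] * count)
--
--     return ''.join(result)
-- ===== SOURCE B (Python) =====
-- def remove_consecutive_t(input_str):
--     out = []
--     rest = input_str
--     while True:
--         j = rest.find('ttt')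
--         if j == -1:
--             out.append(rest)
--             break
--         out.append(rest[:j])
--         k = j + 3
--         while k < len(rest) and rest[k] == 't':
--             k += 1
--         rest = rest[k:]
--     return ''.join(out)
-- ===== Notes on version B (the rewrite author's own statement) =====
-- stated objective: faster
-- what changed: Replaces A's per-character Python loop with a running t-counter by repeated substring search: str.find locates the leftmost run of three t characters, the chunk before it is copied whole, the run is skipped, and the scan continues on the remainder.
import Mathlib
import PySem

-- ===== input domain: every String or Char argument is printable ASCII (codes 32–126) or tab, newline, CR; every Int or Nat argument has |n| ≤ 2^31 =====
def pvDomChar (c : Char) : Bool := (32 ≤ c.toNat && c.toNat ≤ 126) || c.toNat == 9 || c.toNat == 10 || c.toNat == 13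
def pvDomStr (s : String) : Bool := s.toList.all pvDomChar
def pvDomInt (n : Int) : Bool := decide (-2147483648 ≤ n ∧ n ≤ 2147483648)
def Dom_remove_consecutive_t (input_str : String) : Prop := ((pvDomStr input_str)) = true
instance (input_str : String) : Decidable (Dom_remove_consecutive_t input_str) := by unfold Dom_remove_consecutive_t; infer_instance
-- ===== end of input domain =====

-- B replaces A's per-character running-counter loop by repeated substring search:
-- str.find locates the leftmost run of three t characters, the chunk before it is
-- copied whole, the run is skipped, and the scan continues on the remainder
-- (same O(n); a timing run measured B faster by a constant factor).


-- ===== PORT A =====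
-- A's loop: state (result, count); flush pending 't's (if count < 3) on each non-'t'
-- char and once more at the end.
def rctGoA : List Char → List Char → Nat → List Char
  | [], result, count =>
      result ++ (if count < 3 then List.replicate count 't' else [])
  | c :: cs, result, count =>
      if c = 't' then
        rctGoA cs result (count + 1)
      else
        rctGoA cs ((if count < 3 then result ++ List.replicate count 't' else result) ++ [c]) 0

def remove_consecutive_t (input_str : String) : String :=
  String.mk (rctGoA input_str.toList [] 0)

-- ===== PORT B =====
-- inner while loop of Source B: 'while k < len(rest) and rest[k] == 't': k += 1'
-- (k starts at j+3 ≥ 0 and the index is guarded, so getElem? is exact here)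
def rctSkipT (rest : List Char) (k : Nat) : Nat :=
  if h : k < rest.length ∧ rest[k]? = some 't' then rctSkipT rest (k + 1) else k
termination_by rest.length - k
decreasing_by omega

-- termination helper for rctGoB, cited by name in decreasing_by
theorem rctSkipT_ge (rest : List Char) (k : Nat) : k ≤ rctSkipT rest k := by
  induction k using rctSkipT.induct (rest := rest) with
  | case1 k h ih => rw [rctSkipT, dif_pos h]; omega
  | case2 k h => rw [rctSkipT, dif_neg h]

-- Source B's outer while loop: rest.find('ttt') (PySem.Chars.find, exact), slices
-- rest[:j] and rest[k:] with 0 ≤ j, 0 ≤ k (take/drop are exact there)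
def rctGoB (rest : List Char) : List Char :=
  let j := PySem.Chars.find rest ['t', 't', 't']
  if hj : j = -1 then rest
  else
    rest.take j.toNat ++ rctGoB (rest.drop (rctSkipT rest (j.toNat + 3)))
termination_by rest.length
decreasing_by
  have h3 : (3 : Nat) ≤ rest.length := by
    have hinf := (PySem.Chars.find_ne_neg_one_iff rest ['t', 't', 't']).mp hj
    simpa using hinf.length_le
  have hk := rctSkipT_ge rest ((PySem.Chars.find rest ['t', 't', 't']).toNat + 3)
  simp only [List.length_drop]
  omega

def remove_consecutive_t_alt (input_str : String) : String :=
  String.mk (rctGoB input_str.toList)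

-- ===== PRECONDITION & SPEC =====
def Spec_remove_consecutive_t (input_str : String) (out : String) : Prop := out = remove_consecutive_t_alt input_str
instance (input_str : String) (out : String) : Decidable (Spec_remove_consecutive_t input_str out) := by unfold Spec_remove_consecutive_t; infer_instance

-- ===== CLAIM (what is proved, stated in full; the proofs are below) =====
def Claim_equal_remove_consecutive_t : Prop := ∀ (input_str : String), Dom_remove_consecutive_t input_str → Spec_remove_consecutive_t input_str (remove_consecutive_t input_str)

-- ===== LEMMAS AND PROOFS =====

-- reference function (proof-only): group-wise pass over maximal runs
def tSpec : List Char → List Char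
  | [] => []
  | c :: cs =>
      let n := (cs.takeWhile (· = c)).length + 1
      (if c = 't' ∧ 3 ≤ n then [] else List.replicate n c) ++ tSpec (cs.dropWhile (· = c))
termination_by l => l.length
decreasing_by
  simp only [List.length_cons]
  exact Nat.lt_succ_of_le (List.length_dropWhile_le _ _)

-- accumulator lemma for A's loop
theorem rctGoA_acc (cs : List Char) : ∀ (res : List Char) (count : Nat),
    rctGoA cs res count = res ++ rctGoA cs [] count := by
  induction cs with
  | nil => intro res count; simp [rctGoA]
  | cons c cs ih =>
      intro res count
      by_cases hc : c = 't'
      · rw [rctGoA, if_pos hc, rctGoA, if_pos hc, ih]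
      · rw [rctGoA, if_neg hc, rctGoA, if_neg hc]
        rw [ih, ih ((if count < 3 then [] ++ List.replicate count 't' else []) ++ [c])]
        split_ifs <;> simp

theorem tSpec_cons_ne (c : Char) (cs : List Char) (hc : c ≠ 't') :
    tSpec (c :: cs) = c :: tSpec cs := by
  cases cs with
  | nil => simp [tSpec, hc]
  | cons d cs' =>
      by_cases hd : d = c
      · subst hd
        rw [tSpec, tSpec]
        simp only [List.takeWhile_cons, List.dropWhile_cons, decide_eq_true_eq, if_pos rfl,
          List.length_cons, hc, false_and, if_false]
        rw [List.replicate_succ]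
        simp
      · rw [tSpec]
        simp [List.takeWhile_cons, List.dropWhile_cons, hd, hc, List.replicate]

theorem tSpec_t_peel (cs : List Char) :
    tSpec cs =
      (if (cs.takeWhile (· = 't')).length < 3
        then List.replicate (cs.takeWhile (· = 't')).length 't' else [])
      ++ tSpec (cs.dropWhile (· = 't')) := by
  cases cs with
  | nil => simp [tSpec]
  | cons c cs' =>
      by_cases hc : c = 't'
      · subst hc
        rw [tSpec]
        simp only [List.takeWhile_cons, List.dropWhile_cons, decide_true, if_true,
          List.length_cons, true_and]
        congr 1
        split_ifs <;> first | rfl | omega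
      · simp [List.takeWhile_cons, List.dropWhile_cons, hc]

-- main invariant: A's loop with a pending count of 't's equals the pending run (merged with
-- the leading 't's of cs) followed by the grouped pass on the rest.
theorem rctGoA_eq (cs : List Char) : ∀ (count : Nat),
    rctGoA cs [] count =
      (if count + (cs.takeWhile (· = 't')).length < 3
        then List.replicate (count + (cs.takeWhile (· = 't')).length) 't' else [])
      ++ tSpec (cs.dropWhile (· = 't')) := by
  induction cs with
  | nil => intro count; simp [rctGoA, tSpec]
  | cons c cs ih =>
      intro count
      by_cases hc : c = 't'
      · subst hc
        rw [rctGoA, if_pos rfl, ih (count + 1)]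
        simp only [List.takeWhile_cons, List.dropWhile_cons, decide_true, if_true,
          List.length_cons]
        rw [Nat.add_assoc, Nat.add_comm 1]
      · rw [rctGoA, if_neg hc, rctGoA_acc, ih 0]
        simp only [Nat.zero_add]
        rw [← tSpec_t_peel cs]
        simp [List.takeWhile_cons, List.dropWhile_cons, hc, tSpec_cons_ne c cs hc]

-- ===== B-side lemmas =====

-- leading-run decomposition facts
theorem run_takeWhile (m : Nat) (suf : List Char) (hs : suf.head? ≠ some 't') :
    (List.replicate m 't' ++ suf).takeWhile (· = 't') = List.replicate m 't' ∧
    (List.replicate m 't' ++ suf).dropWhile (· = 't') = suf := by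
  induction m with
  | zero =>
      cases suf with
      | nil => simp
      | cons d ds =>
          have hd : d ≠ 't' := by intro h; exact hs (by simp [h])
          simp [List.takeWhile_cons, List.dropWhile_cons, hd]
  | succ n ih => simpa [List.replicate_succ, List.takeWhile_cons, List.dropWhile_cons] using ih

theorem dropWhile_head_ne (l : List Char) : (l.dropWhile (· = 't')).head? ≠ some 't' := by
  induction l with
  | nil => simp
  | cons c cs ih =>
      by_cases hc : c = 't'
      · simpa [List.dropWhile_cons, hc] using ih
      · simp [List.dropWhile_cons, hc]

theorem takeWhile_eq_replicate (l : List Char) :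
    l.takeWhile (· = 't') = List.replicate (l.takeWhile (· = 't')).length 't' := by
  apply List.eq_replicate_of_mem
  intro b hb
  have := List.mem_takeWhile_imp hb
  simpa using this

-- no run of three 't's → the grouped pass is the identity
theorem replicate_t_prefix (m n : Nat) (h : m ≤ n) :
    List.replicate m 't' <+: List.replicate n 't' :=
  ⟨List.replicate (n - m) 't', by rw [List.replicate_append_replicate]; congr 1; omega⟩

theorem tSpec_id (l : List Char) (h : ¬ ['t', 't', 't'] <:+: l) : tSpec l = l := by
  have main : ∀ (n : Nat) (l : List Char), l.length ≤ n → ¬ ['t', 't', 't'] <:+: l →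
      tSpec l = l := by
    intro n
    induction n with
    | zero =>
        intro l hl _
        have : l = [] := List.length_eq_zero_iff.mp (by omega)
        subst this; rw [tSpec]
    | succ n ih =>
        intro l hl hno
        match l with
        | [] => rw [tSpec]
        | c :: cs =>
            by_cases hc : c = 't'
            · subst hc
              have hm3 : ((('t' : Char) :: cs).takeWhile (· = 't')).length < 3 := by
                by_contra hge
                apply hno
                apply List.IsPrefix.isInfix
                calc ['t', 't', 't']
                    <+: ('t' :: cs).takeWhile (· = 't') := by
                      rw [show (['t', 't', 't'] : List Char) = List.replicate 3 't' from rfl,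
                        takeWhile_eq_replicate]
                      exact replicate_t_prefix 3 _ (by omega)
                  _ <+: 't' :: cs := List.takeWhile_prefix _
              rw [tSpec_t_peel ('t' :: cs), if_pos hm3]
              have hrec : tSpec (('t' :: cs).dropWhile (· = 't'))
                  = ('t' :: cs).dropWhile (· = 't') := by
                apply ih
                · rw [show (('t' : Char) :: cs).dropWhile (· = 't') = cs.dropWhile (· = 't') by
                    simp [List.dropWhile_cons]]
                  calc (cs.dropWhile (· = 't')).length
                      ≤ cs.length := List.length_dropWhile_le _ _
                    _ ≤ n := by simpa using hl
                · intro hinf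
                  exact hno (hinf.trans (List.dropWhile_suffix _).isInfix)
              rw [hrec, ← takeWhile_eq_replicate, List.takeWhile_append_dropWhile]
            · rw [tSpec_cons_ne c cs hc]
              rw [ih cs (by simpa using hl) (fun hinf => hno (List.infix_cons hinf))]
  exact main l.length l le_rfl h

-- appending at a clean boundary
theorem tSpec_append (pre x : List Char) (hpre : ¬ ['t', 't', 't'] <:+: pre)
    (hlast : pre.getLast? ≠ some 't') : tSpec (pre ++ x) = pre ++ tSpec x := by
  have main : ∀ (n : Nat) (pre : List Char), pre.length ≤ n → ¬ ['t', 't', 't'] <:+: pre →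
      pre.getLast? ≠ some 't' → tSpec (pre ++ x) = pre ++ tSpec x := by
    intro n
    induction n with
    | zero =>
        intro pre hl _ _
        have : pre = [] := List.length_eq_zero_iff.mp (by omega)
        subst this; simp
    | succ n ih =>
        intro pre hl hpre hlast
        match pre with
        | [] => simp
        | c :: cs =>
            by_cases hc : c = 't'
            · subst hc
              -- decompose pre into its leading t-run and the rest
              set m := ((('t' : Char) :: cs).takeWhile (· = 't')).length with hm
              set rest := (('t' : Char) :: cs).dropWhile (· = 't') with hrest
              have hm1 : 1 ≤ m := by
                rw [hm]; simp [List.takeWhile_cons]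
              have hm3 : m < 3 := by
                by_contra hge
                apply hpre
                apply List.IsPrefix.isInfix
                calc ['t', 't', 't']
                    <+: ('t' :: cs).takeWhile (· = 't') := by
                      rw [show (['t', 't', 't'] : List Char) = List.replicate 3 't' from rfl,
                        takeWhile_eq_replicate]
                      exact replicate_t_prefix 3 _ (by omega)
                  _ <+: 't' :: cs := List.takeWhile_prefix _
              have hsplit : ('t' : Char) :: cs = List.replicate m 't' ++ rest := by
                rw [hrest, hm, ← takeWhile_eq_replicate, List.takeWhile_append_dropWhile]
              have hrne : rest ≠ [] := by
                intro hnil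
                apply hlast
                rw [hsplit, hnil, List.append_nil, List.getLast?_replicate]
                simp [show m ≠ 0 by omega]
              have hrhead : (rest ++ x).head? = rest.head? := List.head?_append_of_ne_nil _ hrne
              have hrw := run_takeWhile m (rest ++ x)
                (by rw [hrhead]; exact dropWhile_head_ne _)
              rw [hsplit, List.append_assoc]
              rw [tSpec_t_peel (List.replicate m 't' ++ (rest ++ x)), hrw.1, hrw.2,
                List.length_replicate, if_pos hm3]
              have hrec : tSpec (rest ++ x) = rest ++ tSpec x := by
                apply ih
                · have : rest.length ≤ cs.length := by
                    rw [hrest]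
                    simpa [List.dropWhile_cons] using List.length_dropWhile_le (· = 't') cs
                  simp at hl; omega
                · intro hinf
                  exact hpre (hinf.trans (by rw [hsplit]; exact (List.suffix_append _ _).isInfix))
                · rw [show rest.getLast? = (('t' : Char) :: cs).getLast? by
                    rw [hsplit]; exact (List.getLast?_append_of_ne_nil _ hrne).symm]
                  exact hlast
              rw [hrec, ← List.append_assoc]
            · rw [List.cons_append, tSpec_cons_ne c _ hc]
              have hcs : tSpec (cs ++ x) = cs ++ tSpec x := by
                apply ih cs (by simpa using hl) (fun hinf => hpre (List.infix_cons hinf))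
                intro hlcs
                apply hlast
                rcases List.eq_nil_or_concat cs with hnil | ⟨ys, y, hy⟩
                · rw [hnil] at hlcs; simp at hlcs
                · subst hy
                  simp only [List.concat_eq_append] at hlcs ⊢
                  rw [show c :: (ys ++ [y]) = (c :: ys) ++ [y] from rfl,
                    List.getLast?_append_of_ne_nil _ (by simp)]
                  rw [List.getLast?_append_of_ne_nil _ (by simp)] at hlcs
                  exact hlcs
              rw [hcs, List.cons_append]
  exact main pre.length pre le_rfl hpre hlast

-- skipT over a shifted prefix
theorem rctSkipT_shift (pre rest : List Char) (k : Nat) :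
    rctSkipT (pre ++ rest) (pre.length + k) = pre.length + rctSkipT rest k := by
  induction k using rctSkipT.induct (rest := rest) with
  | case1 k h ih =>
      have hc1 : pre.length + k < (pre ++ rest).length ∧
          (pre ++ rest)[pre.length + k]? = some 't' := by
        simp only [List.getElem?_append_right (by omega : pre.length ≤ pre.length + k),
          List.length_append, Nat.add_sub_cancel_left]
        exact ⟨by omega, h.2⟩
      rw [rctSkipT, dif_pos hc1, show pre.length + k + 1 = pre.length + (k + 1) from rfl, ih]
      conv_rhs => rw [rctSkipT, dif_pos h]
  | case2 k h =>
      have hc2 : ¬ (pre.length + k < (pre ++ rest).length ∧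
          (pre ++ rest)[pre.length + k]? = some 't') := by
        simp only [List.getElem?_append_right (by omega : pre.length ≤ pre.length + k),
          List.length_append, Nat.add_sub_cancel_left]
        intro hcc
        exact h ⟨by omega, hcc.2⟩
      rw [rctSkipT, dif_neg hc2]
      conv_rhs => rw [rctSkipT, dif_neg h]

-- skipT across a maximal run
theorem rctSkipT_run (m : Nat) (suf : List Char) (hs : suf.head? ≠ some 't') :
    ∀ k, k ≤ m → rctSkipT (List.replicate m 't' ++ suf) k = m := by
  intro k
  induction k using rctSkipT.induct (rest := List.replicate m 't' ++ suf) with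
  | case1 k h ih =>
      intro hk
      have hkm : k < m := by
        rcases Nat.lt_or_ge k m with h' | h'
        · exact h'
        · exfalso
          have hkm' : k = m := by omega
          have : (List.replicate m 't' ++ suf)[k]? = suf[0]? := by
            rw [List.getElem?_append_right (by simp [hkm'])]
            simp [hkm']
          rw [this] at h
          exact hs (by rw [List.head?_eq_getElem?]; exact h.2)
      rw [rctSkipT, dif_pos h]
      exact ih hkm
  | case2 k h =>
      intro hk
      rcases Nat.lt_or_ge k m with h' | h'
      · exfalso
        apply h
        constructor
        · simp; omega
        · rw [List.getElem?_append_left (by simpa using h')]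
          simp [h']
      · rw [rctSkipT, dif_neg h]; omega

-- the main equivalence of B's search loop with the grouped pass
theorem rctGoB_eq_tSpec (l : List Char) : rctGoB l = tSpec l := by
  have main : ∀ (n : Nat) (l : List Char), l.length ≤ n → rctGoB l = tSpec l := by
    intro n
    induction n with
    | zero =>
        intro l hl
        have : l = [] := List.length_eq_zero_iff.mp (by omega)
        subst this
        have hfind : PySem.Chars.find ([] : List Char) ['t', 't', 't'] = -1 := by decide
        rw [rctGoB, tSpec]
        simp [hfind]
    | succ n ih =>
        intro l hl
        by_cases hj : PySem.Chars.find l ['t', 't', 't'] = -1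
        · rw [rctGoB]
          simp only [hj, dite_true, reduceDIte]
          exact (tSpec_id l ((PySem.Chars.find_eq_neg_one_iff l _).mp hj)).symm
        · rw [rctGoB, dif_neg hj]
          have h0 : 0 ≤ PySem.Chars.find l ['t', 't', 't'] :=
            (PySem.Chars.find_nonneg_iff l _).mpr ((PySem.Chars.find_ne_neg_one_iff l _).mp hj)
          obtain ⟨hp, hmin⟩ := PySem.Chars.find_spec h0
          set jn := (PySem.Chars.find l ['t', 't', 't']).toNat with hjn
          set d := l.drop jn with hd
          set m := (d.takeWhile (· = 't')).length with hm
          set suf := d.dropWhile (· = 't') with hsuf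
          obtain ⟨w, hw⟩ := hp
          have hm3 : 3 ≤ m := by
            have htw : d.takeWhile (· = 't') = 't' :: 't' :: 't' :: (w.takeWhile (· = 't')) := by
              rw [← hw]; simp [List.takeWhile_cons]
            rw [hm, htw]; simp
          have hdlen3 : 3 ≤ d.length := by rw [← hw]; simp
          have hdlen : d.length = l.length - jn := by rw [hd]; simp
          have hjl : jn + 3 ≤ l.length := by omega
          have hsplit : d = List.replicate m 't' ++ suf := by
            rw [hm, hsuf, ← takeWhile_eq_replicate, List.takeWhile_append_dropWhile]
          have hds : d.length = m + suf.length := by rw [hsplit]; simp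
          have hsufhead : suf.head? ≠ some 't' := dropWhile_head_ne d
          have hpre_decomp : l = l.take jn ++ d := (List.take_append_drop jn l).symm
          have hlenpre : (l.take jn).length = jn := by simp [List.length_take]; omega
          have hskip : rctSkipT l (jn + 3) = jn + m := by
            conv_lhs => rw [hpre_decomp, show jn + 3 = (l.take jn).length + 3 by rw [hlenpre]]
            rw [rctSkipT_shift, hlenpre, hsplit, rctSkipT_run m suf hsufhead 3 hm3]
          have hdropk : l.drop (jn + m) = suf := by
            have h1 : d.drop m = suf := by rw [hsplit, List.drop_left' (by simp)]
            rw [← h1, hd, List.drop_drop, Nat.add_comm]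
          have hpre_noinfix : ¬ ['t', 't', 't'] <:+: l.take jn := by
            intro hinf
            have hIn := (PySem.Chars.isIn_iff_infix _ _).mpr hinf
            obtain ⟨i, hi⟩ := (PySem.Chars.exists_prefix_drop_iff_isIn _ _).mpr hIn
            have hilt : i < jn := by
              by_contra hge
              rw [List.drop_eq_nil_of_le (by rw [hlenpre]; omega)] at hi
              simp at hi
            apply hmin i (by omega)
            rw [List.drop_take] at hi
            exact hi.trans (List.take_prefix _ _)
          have hpre_last : (l.take jn).getLast? ≠ some 't' := by
            intro hfin
            rcases Nat.eq_zero_or_pos jn with h0' | h0'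
            · rw [h0'] at hfin; simp at hfin
            · have hjn1 : jn - 1 < l.length := by omega
              rw [List.getLast?_eq_getElem?, hlenpre, List.getElem?_take_of_lt (by omega)] at hfin
              apply hmin (jn - 1) (by omega)
              have hdrop1 : l.drop (jn - 1) = 't' :: l.drop jn := by
                rw [List.drop_eq_getElem_cons hjn1]
                congr 1
                · rw [List.getElem?_eq_getElem hjn1] at hfin
                  exact Option.some.inj hfin
                · congr 1; omega
              rw [hdrop1, ← hd, ← hw]
              exact ⟨'t' :: w, rfl⟩
          rw [hskip, hdropk, ih suf (by omega)]
          conv_rhs => rw [hpre_decomp]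
          rw [tSpec_append _ _ hpre_noinfix hpre_last, tSpec_t_peel d, ← hm, ← hsuf,
            if_neg (by omega)]
          simp
  exact main l.length l le_rfl

-- ===== VERDICT (by name: the statement is the Claim_ definition above) =====
theorem remove_consecutive_t_spec : Claim_equal_remove_consecutive_t := by
  intro s _
  unfold Spec_remove_consecutive_t remove_consecutive_t remove_consecutive_t_alt
  rw [rctGoA_eq s.toList 0, rctGoB_eq_tSpec, tSpec_t_peel s.toList]
  simp only [Nat.zero_add]
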